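-- pv_equiv track=rewrite | github.com/ccc013/DataStructe-Algorithms_Study | Python/Leetcodes/string/jianzhi_offer_46_translateNum.py | translateNum2
-- ===== SOURCE A (Python) =====
-- def translateNum2(num: int) -> int:
--     # 数字求余
--     a = b = 1
--     # 获取最后一位数字
--     y = num % 10
--     while num != 0:
--         num //= 10
--         x = num % 10
--         tmp = 10 * x + y
--         a, b = a + b if 10 <= tmp <= 25 else a, a
--         y = x
--     return a
-- ===== SOURCE B (Python) =====
-- def translateNum2(num: int) -> int:
--     # Naive recursion: the last digit always stands alone, and the last two
--     # digits also form a letter when they read 10..25.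
--     if num < 10:
--         return 1
--     ways = translateNum2(num // 10)
--     if 10 <= num % 100 <= 25:
--         ways += translateNum2(num // 100)
--     return ways
-- ===== Notes on version B (the rewrite author's own statement) =====
-- stated objective: simpler
-- what changed: A's iterative two-variable DP over adjacent digit pairs is replaced by a direct naive recursion on the number itself: f(num)=1 for num<10, else f(num//10) plus f(num//100) when the last two digits read 10..25.
import Mathlib
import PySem

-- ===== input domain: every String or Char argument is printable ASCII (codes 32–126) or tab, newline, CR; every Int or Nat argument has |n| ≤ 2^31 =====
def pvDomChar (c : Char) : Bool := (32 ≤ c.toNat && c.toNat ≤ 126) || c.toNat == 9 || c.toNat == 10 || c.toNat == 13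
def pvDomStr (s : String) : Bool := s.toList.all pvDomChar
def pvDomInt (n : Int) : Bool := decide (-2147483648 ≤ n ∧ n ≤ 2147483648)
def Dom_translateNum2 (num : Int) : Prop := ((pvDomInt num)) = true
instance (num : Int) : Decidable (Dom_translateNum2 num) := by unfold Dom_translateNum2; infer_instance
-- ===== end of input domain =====

-- B replaces A's iterative two-variable DP with a naive recursion on the number
-- (strip the last digit, and also the last pair when it reads 10..25); objective: simpler.

-- ===== PORT A =====
-- A's while loop; fuel only makes the recursion total (A diverges on num < 0,
-- which Pre_ excludes; fuel num.toNat + 1 is enough on Pre_). On fuel-out returns a.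
def translateNum2Loop (fuel : Nat) (num a b y : Int) : Int :=
  match fuel with
  | 0 => a
  | f + 1 =>
    if num = 0 then a
    else
      let num' := PySem.Int.floordiv num 10
      let x := PySem.Int.mod num' 10
      let tmp := 10 * x + y
      let a' := if 10 ≤ tmp ∧ tmp ≤ 25 then a + b else a
      translateNum2Loop f num' a' a x

def translateNum2 (num : Int) : Int :=
  translateNum2Loop (num.toNat + 1) num 1 1 (PySem.Int.mod num 10)

-- ===== PORT B =====
-- termination helper for the port's recursion (cited in decreasing_by)
lemma pvDiv_toNat_lt (num d : Int) (hd : (1:Int) < d) (h : ¬ num < 10) :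
    (PySem.Int.floordiv num d).toNat < num.toNat := by
  rw [PySem.Int.floordiv_eq_ediv_of_pos (by omega)]
  have h1 : num / d < num := by
    apply Int.ediv_lt_of_lt_mul (by omega)
    nlinarith
  have h2 : 0 ≤ num / d := Int.ediv_nonneg (by omega) (by omega)
  omega

def translateNum2_alt (num : Int) : Int :=
  if h : num < 10 then 1
  else
    let ways := translateNum2_alt (PySem.Int.floordiv num 10)
    if 10 ≤ PySem.Int.mod num 100 ∧ PySem.Int.mod num 100 ≤ 25 then
      ways + translateNum2_alt (PySem.Int.floordiv num 100)
    else ways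
termination_by num.toNat
decreasing_by
  · exact pvDiv_toNat_lt num 10 (by omega) h
  · exact pvDiv_toNat_lt num 100 (by omega) h

-- ===== PRECONDITION & SPEC =====
-- Pre_ excludes num < 0, on which A loops forever (num //= 10 never reaches 0).
def Pre_translateNum2 (num : Int) : Prop := 0 ≤ num
instance (num : Int) : Decidable (Pre_translateNum2 num) := by unfold Pre_translateNum2; infer_instance
def pvWitness_translateNum2 : Int := 12258

def Spec_translateNum2 (num : Int) (out : Int) : Prop := out = translateNum2_alt num
instance (num : Int) (out : Int) : Decidable (Spec_translateNum2 num out) := by unfold Spec_translateNum2; infer_instance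

-- ===== CLAIM (what is proved, stated in full; the proofs are below) =====
def Claim_equal_translateNum2 : Prop := ∀ (num : Int), Dom_translateNum2 num → Pre_translateNum2 num → Spec_translateNum2 num (translateNum2 num)

-- ===== LEMMAS AND PROOFS =====

-- the LSB-first digit list of num (proof-side model of A's stripping)
def pvDigits (fuel : Nat) (num : Int) : List Int :=
  match fuel with
  | 0 => []
  | f + 1 =>
    if num = 0 then []
    else PySem.Int.mod num 10 :: pvDigits f (PySem.Int.floordiv num 10)

-- A's DP restated as recursion on the digit list
def pvDP (a b : Int) : List Int → Int
  | low :: high :: rest =>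
      pvDP (if 10 ≤ 10 * high + low ∧ 10 * high + low ≤ 25 then a + b else a) a (high :: rest)
  | _ => a

lemma pvLoop_eq_pvDP : ∀ (fuel : Nat) (num a b : Int), 0 ≤ num → num.toNat < fuel →
    translateNum2Loop fuel num a b (PySem.Int.mod num 10) = pvDP a b (pvDigits fuel num) := by
  intro fuel
  induction fuel with
  | zero => intro num a b _ h; omega
  | succ f ih =>
    intro num a b hnum hf
    by_cases h0 : num = 0
    · subst h0; simp [translateNum2Loop, pvDigits, pvDP]
    · have h1 : 1 ≤ num := by omega
      have hm : ∀ a : Int, PySem.Int.mod a 10 = a % 10 :=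
        fun a => PySem.Int.mod_eq_emod_of_pos (by omega)
      have hfd : ∀ a : Int, PySem.Int.floordiv a 10 = a / 10 :=
        fun a => PySem.Int.floordiv_eq_ediv_of_pos (by omega)
      rw [translateNum2Loop, pvDigits]
      simp only [h0, if_false, hm, hfd]
      have hq0 : 0 ≤ num / 10 := by positivity
      by_cases hq : num / 10 = 0
      · -- single digit: the extra iteration only moves b, tmp = num % 10 ≤ 9
        have htmp : ¬ (10 ≤ 10 * (num / 10 % 10) + num % 10 ∧ 10 * (num / 10 % 10) + num % 10 ≤ 25) := by
          rw [hq]; omega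
        rw [if_neg htmp, hq]
        have hnil : pvDigits f (0 : Int) = [] := by cases f <;> simp [pvDigits]
        rw [hnil]
        cases f with
        | zero => rfl
        | succ f' => simp [translateNum2Loop, pvDP]
      · -- at least two digits
        have hq1 : 1 ≤ num / 10 := by omega
        have hfq : (num / 10).toNat < f := by
          have hlt : num / 10 < num := by
            have := Int.ediv_le_self 10 (le_of_lt (by omega : (0:Int) < num))
            omega
          omega
        have hd : pvDigits f (num / 10) = num / 10 % 10 :: pvDigits (f - 1) (num / 10 / 10) := by
          cases f with
          | zero => omega
          | succ f' =>
            rw [pvDigits]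
            simp only [hq, if_false, hm, hfd]
            rfl
        rw [hd, pvDP, ← hd, ← hm (num / 10)]
        exact ih (num / 10) _ a hq0 hfq

-- pvDP is linear in its accumulators
lemma pvDP_linear : ∀ (L : List Int) (a b : Int),
    pvDP a b L = a * pvDP 1 0 L + b * pvDP 0 1 L := by
  intro L
  induction L with
  | nil => intro a b; simp [pvDP]
  | cons l t ih =>
    intro a b
    cases t with
    | nil => simp [pvDP]
    | cons h r =>
      rw [pvDP, pvDP, pvDP]
      split_ifs with hc
      · norm_num
        rw [ih (a + b) a, ih 1 1]
        ring
      · rw [ih a a, ih 1 1, ih 0 0]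
        ring

-- DP with accumulators (1,0): the head digit contributes nothing
lemma pvDP_p (h : Int) (r : List Int) : pvDP 1 0 (h :: r) = pvDP 1 1 r := by
  cases r with
  | nil => simp [pvDP]
  | cons r0 rs => rw [pvDP]; split_ifs <;> simp

-- W(l::h::r) = W(h::r) + [10 ≤ 10h+l ≤ 25] * W(r)   (head-deletion recurrence)
lemma pvDP_head_del (l h : Int) (r : List Int) :
    pvDP 1 1 (l :: h :: r) =
      pvDP 1 1 (h :: r) +
        (if 10 ≤ 10 * h + l ∧ 10 * h + l ≤ 25 then pvDP 1 1 r else 0) := by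
  rw [pvDP]
  split_ifs with hc
  · norm_num
    rw [pvDP_linear (h :: r) 2 1, pvDP_linear (h :: r) 1 1, pvDP_p]
    ring
  · simp

lemma pvDigits_shape (fuel : Nat) (num : Int) (h1 : 1 ≤ num) (hf : num.toNat < fuel) :
    pvDigits fuel num = num % 10 :: pvDigits (fuel - 1) (num / 10) := by
  cases fuel with
  | zero => omega
  | succ f =>
    rw [pvDigits]
    simp only [show num ≠ 0 by omega, if_false,
      PySem.Int.mod_eq_emod_of_pos (show (0:Int) < 10 by omega),
      PySem.Int.floordiv_eq_ediv_of_pos (show (0:Int) < 10 by omega)]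
    rfl

-- B equals the digit-list DP
lemma pvDigits_zero (fuel : Nat) : pvDigits fuel (0 : Int) = [] := by
  cases fuel <;> simp [pvDigits]

lemma pvDigits_irrel : ∀ (f1 f2 : Nat) (num : Int), 0 ≤ num → num.toNat < f1 → num.toNat < f2 →
    pvDigits f1 num = pvDigits f2 num := by
  intro f1
  induction f1 with
  | zero => intro f2 num _ h _; omega
  | succ f ih =>
    intro f2 num hnum h1 h2
    by_cases h0 : num = 0
    · subst h0; rw [pvDigits_zero, pvDigits_zero]
    · have hq : (0:Int) ≤ num / 10 := by positivity
      have hlt : num / 10 < num := by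
        apply Int.ediv_lt_of_lt_mul (by omega)
        nlinarith [hnum, h0, lt_of_le_of_ne hnum (Ne.symm h0)]
      rw [pvDigits_shape (f + 1) num (by omega) h1,
          pvDigits_shape f2 num (by omega) h2]
      cases f2 with
      | zero => omega
      | succ f2' =>
        simp only [Nat.add_sub_cancel]
        exact congrArg _ (ih f2' (num / 10) hq (by omega) (by omega))

lemma alt_eq_pvDP : ∀ (fuel : Nat) (num : Int), 0 ≤ num → num.toNat < fuel →
    translateNum2_alt num = pvDP 1 1 (pvDigits fuel num) := by
  intro fuel
  induction fuel with
  | zero => intro num _ h; omega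
  | succ f ih =>
    intro num hnum hf
    by_cases hlo : num < 10
    · rw [translateNum2_alt, dif_pos hlo]
      by_cases h0 : num = 0
      · subst h0; rw [pvDigits_zero]; rfl
      · rw [pvDigits_shape (f + 1) num (by omega) hf, Nat.add_sub_cancel]
        have : num / 10 = 0 := by omega
        rw [this, pvDigits_zero]
        rfl
    · -- num ≥ 10: two digits are available
      have h1 : (1:Int) ≤ num := by omega
      have hq0 : (0:Int) ≤ num / 10 := by positivity
      have hq1 : (1:Int) ≤ num / 10 := by omega
      have hltq : num / 10 < num := by
        apply Int.ediv_lt_of_lt_mul (by omega); nlinarith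
      have hfq : (num / 10).toNat < f := by omega
      rw [pvDigits_shape (f + 1) num h1 hf, Nat.add_sub_cancel,
          pvDigits_shape f (num / 10) hq1 hfq, pvDP_head_del]
      have hpair : 10 * (num / 10 % 10) + num % 10 = num % 100 := by omega
      rw [hpair]
      rw [translateNum2_alt, dif_neg hlo,
          PySem.Int.floordiv_eq_ediv_of_pos (show (0:Int) < 10 by omega),
          PySem.Int.floordiv_eq_ediv_of_pos (show (0:Int) < 100 by omega),
          PySem.Int.mod_eq_emod_of_pos (show (0:Int) < 100 by omega)]
      have hIH1 : translateNum2_alt (num / 10) = pvDP 1 1 (pvDigits f (num / 10)) :=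
        ih (num / 10) hq0 hfq
      have hdd : num / 10 / 10 = num / 100 := by omega
      have hq100 : (0:Int) ≤ num / 100 := by positivity
      have hltq2 : num / 100 < num := by
        apply Int.ediv_lt_of_lt_mul (by omega); nlinarith
      have hIH2 : translateNum2_alt (num / 100) = pvDP 1 1 (pvDigits (f - 1) (num / 10 / 10)) := by
        rw [hdd, ih (num / 100) hq100 (by omega)]
        exact congrArg _ (pvDigits_irrel f (f - 1) (num / 100) hq100 (by omega) (by omega))
      rw [pvDigits_shape f (num / 10) hq1 hfq] at hIH1
      rw [← hIH1, ← hIH2]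
      split_ifs with hc
      · rfl
      · simp

-- ===== VERDICT (by name: the statement is the Claim_ definition above) =====
theorem translateNum2_spec : Claim_equal_translateNum2 := by
  intro num _ hpre
  unfold Spec_translateNum2 translateNum2
  rw [pvLoop_eq_pvDP (num.toNat + 1) num 1 1 hpre (by omega)]
  exact (alt_eq_pvDP (num.toNat + 1) num hpre (by omega)).symm
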